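-- pv_equiv track=rewrite | github.com/DimaLeshchinskiy/QuantumEmulator | qsim/util/anf.py | getPascalTriangle
-- ===== SOURCE A (Python) =====
-- def getPascalTriangle(input=[]):
--     triangle = [input]
--     for i in range(len(input) - 1):
--         row = []
--         for j in range(1, len(triangle[i])):
--             row.append((triangle[i][j - 1] + (triangle[i][j])) % 2)
--         triangle.append(row)
--     return triangle
-- ===== SOURCE B (Python) =====
-- def getPascalTriangle(input=[]):
--     if len(input) <= 1:
--         return [input]
--     next_row = [(input[j - 1] + input[j]) % 2 for j in range(1, len(input))]
--     return [input] + getPascalTriangle(next_row)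
-- ===== Notes on version B (the rewrite author's own statement) =====
-- stated objective: alternative
-- what changed: Replaced the index-driven double loop that appends rows to an accumulated triangle (indexing back into triangle[i]) by a direct structural recursion on the shrinking row: base case len<=1 returns [input], otherwise cons the row onto the recursion on its XOR-reduced successor.
import Mathlib
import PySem

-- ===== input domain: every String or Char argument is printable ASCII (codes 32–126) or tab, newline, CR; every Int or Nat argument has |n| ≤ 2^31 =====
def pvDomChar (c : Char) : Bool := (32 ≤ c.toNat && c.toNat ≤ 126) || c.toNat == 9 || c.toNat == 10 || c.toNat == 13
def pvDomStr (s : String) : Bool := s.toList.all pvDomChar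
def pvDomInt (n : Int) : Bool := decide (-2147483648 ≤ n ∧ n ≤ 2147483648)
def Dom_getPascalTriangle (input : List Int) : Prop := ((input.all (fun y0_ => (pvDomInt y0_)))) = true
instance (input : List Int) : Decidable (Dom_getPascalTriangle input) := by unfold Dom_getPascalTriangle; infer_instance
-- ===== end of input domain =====

-- B replaces A's index-driven double loop over an accumulating triangle by a direct
-- structural recursion on the shrinking row (alternative decomposition, same cost).
-- ===== PORT A =====
-- inner loop of A: row = []; for j in range(1, len(r)): row.append((r[j-1]+r[j]) % 2)
def pvRowStep (r : List Int) : List Int :=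
  (PySem.List.pyRange 1 (r.length : Int) 1).foldl
    (fun row j => row ++ [PySem.Int.mod (PySem.List.pyGetD r (j - 1) 0 + PySem.List.pyGetD r j 0) 2]) []

def getPascalTriangle (input : List Int) : List (List Int) :=
  (PySem.List.pyRange 0 ((input.length : Int) - 1) 1).foldl
    (fun triangle i => triangle ++ [pvRowStep (PySem.List.pyGetD triangle i ([] : List Int))])
    [input]

-- ===== PORT B =====
-- B's list comprehension: [(r[j-1]+r[j]) % 2 for j in range(1, len(r))]
def pvNextRow (r : List Int) : List Int :=
  (PySem.List.pyRange 1 (r.length : Int) 1).map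
    (fun j => PySem.Int.mod (PySem.List.pyGetD r (j - 1) 0 + PySem.List.pyGetD r j 0) 2)

theorem pvNextRow_length (r : List Int) : (pvNextRow r).length = r.length - 1 := by
  simp [pvNextRow, PySem.List.length_pyRange_one]

def getPascalTriangle_alt (input : List Int) : List (List Int) :=
  if input.length ≤ 1 then [input]
  else input :: getPascalTriangle_alt (pvNextRow input)
termination_by input.length
decreasing_by simp only [pvNextRow_length]; omega

-- ===== PRECONDITION & SPEC =====
def Spec_getPascalTriangle (input : List Int) (out : List (List Int)) : Prop := out = getPascalTriangle_alt input
instance (input : List Int) (out : List (List Int)) : Decidable (Spec_getPascalTriangle input out) := by unfold Spec_getPascalTriangle; infer_instance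

-- ===== CLAIM (what is proved, stated in full; the proofs are below) =====
def Claim_equal_getPascalTriangle : Prop := ∀ (input : List Int), Dom_getPascalTriangle input → Spec_getPascalTriangle input (getPascalTriangle input)

-- ===== LEMMAS AND PROOFS =====

-- ===== VERDICT (by name: the statement is the Claim_ definition above) =====
-- the chain of rows below the top one: pvTail r t = [step r, step^2 r, …, step^t r]
def pvTail (r : List Int) : Nat → List (List Int)
  | 0 => []
  | k + 1 => pvNextRow r :: pvTail (pvNextRow r) k

theorem pvRowStep_eq_nextRow (r : List Int) : pvRowStep r = pvNextRow r := by
  unfold pvRowStep pvNextRow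
  rw [PySem.List.foldl_append_singleton_eq_map]
  simp

theorem pvGetD_append_len (T : List (List Int)) (x : List Int) :
    PySem.List.pyGetD (T ++ [x]) ((T.length : Nat) : Int) ([] : List Int) = x := by
  simp [PySem.List.pyGetD_natCast]

theorem pvLoopA (t : Nat) : ∀ (a : Nat) (T : List (List Int)) (r : List Int),
    T.length = a + 1 → PySem.List.pyGetD T ((a : Nat) : Int) ([] : List Int) = r →
    (PySem.List.pyRange (a : Int) ((a : Int) + (t : Int)) 1).foldl
      (fun triangle i => triangle ++ [pvRowStep (PySem.List.pyGetD triangle i ([] : List Int))]) T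
    = T ++ pvTail r t := by
  induction t with
  | zero => intro a T r _ _; simp [PySem.List.pyRange_one_eq_nil, pvTail]
  | succ k ih =>
    intro a T r hlen hget
    rw [PySem.List.pyRange_one_cons (by push_cast; omega)]
    simp only [List.foldl_cons, hget]
    rw [pvRowStep_eq_nextRow]
    have h1 : ((a : Int) + 1) = ((a + 1 : Nat) : Int) := by push_cast; ring
    have h2 : ((a : Int) + ((k + 1 : Nat) : Int)) = ((a + 1 : Nat) : Int) + (k : Int) := by
      push_cast; ring
    rw [h2, h1]
    have := ih (a + 1) (T ++ [pvNextRow r]) (pvNextRow r)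
      (by simp [hlen]) (by rw [← hlen]; exact pvGetD_append_len T _)
    rw [this, pvTail, List.append_assoc]; rfl

theorem pvA_eq_tail (input : List Int) :
    getPascalTriangle input = input :: pvTail input (input.length - 1) := by
  unfold getPascalTriangle
  rcases Nat.eq_zero_or_pos input.length with h | h
  · rw [PySem.List.pyRange_one_eq_nil (by omega)]
    simp [h, pvTail]
  · have hc : ((input.length : Int) - 1) = (0 : Int) + ((input.length - 1 : Nat) : Int) := by
      omega
    rw [hc]
    have := pvLoopA (input.length - 1) 0 [input] input (by simp)
      (by simp [PySem.List.pyGetD_zero, List.getD])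
    simpa using this

theorem pvAlt_eq_tail : ∀ (n : Nat) (r : List Int), r.length = n →
    getPascalTriangle_alt r = r :: pvTail r (r.length - 1) := by
  intro n
  induction n using Nat.strong_induction_on with
  | _ n ih =>
    intro r hn
    unfold getPascalTriangle_alt
    by_cases h : r.length ≤ 1
    · have : r.length - 1 = 0 := by omega
      simp [h, this, pvTail]
    · simp only [h, if_false]
      have hlt : (pvNextRow r).length < n := by rw [pvNextRow_length]; omega
      rw [ih _ hlt (pvNextRow r) rfl, pvNextRow_length]
      have : r.length - 1 = (r.length - 2) + 1 := by omega
      rw [this, pvTail]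
      norm_num

theorem getPascalTriangle_spec : Claim_equal_getPascalTriangle := by
  intro input _
  unfold Spec_getPascalTriangle
  rw [pvA_eq_tail, pvAlt_eq_tail input.length input rfl]
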